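-- pv_equiv track=rewrite | github.com/NicTiNereknu/football | arrayManipulation.py | hstack
-- ===== SOURCE A (Python) =====
-- def hstack(args):
-- 	# check for first dimension equality
-- 	numberOfRows = [len(arg)     for arg in args]
-- 	uniqNumberOfRows = set(numberOfRows)
-- 	if len(uniqNumberOfRows)!=1:
-- 		raise Exception('Non-consistent number of rows.')
--
-- 	uniqNumberOfRows = list(uniqNumberOfRows)[0]
-- 	a = list()
-- 	for iR in range(uniqNumberOfRows):
-- 		row = list()
-- 		for arg in args:
-- 			row.extend(arg[iR])
-- 		a.append(row)
-- 	return(a)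
-- ===== SOURCE B (Python) =====
-- def hstack(args):
--     # same validation as A: the set of row counts must be a singleton
--     numberOfRows = {len(arg) for arg in args}
--     if len(numberOfRows) != 1:
--         raise Exception('Non-consistent number of rows.')
--     # fold over the arguments, gluing each one onto the rows built so far
--     out = [[] for _ in range(numberOfRows.pop())]
--     for arg in args:
--         out = [row + list(extra) for row, extra in zip(out, arg)]
--     return out
-- ===== Notes on version B (the rewrite author's own statement) =====
-- stated objective: alternative
-- what changed: B replaces A's integer row-index loop with indexed access arg[iR] by a single fold over the arguments that zips each argument onto the accumulated rows with pairwise concatenation, never indexing.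
import Mathlib
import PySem

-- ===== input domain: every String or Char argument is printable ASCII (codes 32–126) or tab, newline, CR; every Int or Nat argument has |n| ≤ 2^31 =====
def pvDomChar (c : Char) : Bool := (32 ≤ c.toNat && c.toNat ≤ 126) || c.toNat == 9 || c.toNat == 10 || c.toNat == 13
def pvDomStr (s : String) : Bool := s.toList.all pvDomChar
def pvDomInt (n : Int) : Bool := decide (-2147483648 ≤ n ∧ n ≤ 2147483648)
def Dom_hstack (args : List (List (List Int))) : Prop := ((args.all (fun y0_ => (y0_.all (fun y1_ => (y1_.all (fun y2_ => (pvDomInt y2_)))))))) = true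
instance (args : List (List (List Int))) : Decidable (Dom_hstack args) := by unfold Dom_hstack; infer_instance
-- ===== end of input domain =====

-- B replaces A's row-index loop with a single fold over the arguments zipping each onto the accumulated rows (alternative decomposition, same cost).
-- ===== PORT A =====
def hstack (args : List (List (List Int))) : List (List Int) :=
  let numberOfRows : List Int := args.map (fun arg => (arg.length : Int))
  let uniqNumberOfRows : PySem.Set Int := PySem.Set.ofList numberOfRows
  if uniqNumberOfRows.length ≠ 1 then []   -- raise Exception('Non-consistent number of rows.') : excluded by Pre_
  else
    let n : Int := uniqNumberOfRows.headD 0   -- list(uniqNumberOfRows)[0] (singleton set)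
    (PySem.List.pyRange 0 n 1).foldl
      (fun a iR =>
        a ++ [args.foldl (fun row arg => row ++ PySem.List.pyGetD arg iR []) []]) []

-- ===== PORT B =====
def hstack_alt (args : List (List (List Int))) : List (List Int) :=
  let numberOfRows : PySem.Set Int := PySem.Set.ofList (args.map (fun arg => (arg.length : Int)))
  if numberOfRows.length ≠ 1 then []   -- raise Exception('Non-consistent number of rows.') : excluded by Pre_
  else
    let n : Int := numberOfRows.headD 0
    args.foldl (fun out arg => List.zipWith (· ++ ·) out arg) (List.replicate n.toNat [])

-- ===== PRECONDITION & SPEC =====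
-- Pre_ excludes exactly the inputs on which A raises: the empty argument list and arguments with differing row counts.
def Pre_hstack (args : List (List (List Int))) : Prop :=
  args ≠ [] ∧ ∀ a ∈ args, a.length = (args.headD []).length
instance (args : List (List (List Int))) : Decidable (Pre_hstack args) := by unfold Pre_hstack; infer_instance
def pvWitness_hstack : List (List (List Int)) := [[[1, 2], [3]], [[4], [5, 6]]]
def Spec_hstack (args : List (List (List Int))) (out : List (List Int)) : Prop := out = hstack_alt args
instance (args : List (List (List Int))) (out : List (List Int)) : Decidable (Spec_hstack args out) := by unfold Spec_hstack; infer_instance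

-- ===== CLAIM (what is proved, stated in full; the proofs are below) =====
def Claim_equal_hstack : Prop := ∀ (args : List (List (List Int))), Dom_hstack args → Pre_hstack args → Spec_hstack args (hstack args)

-- ===== LEMMAS AND PROOFS =====

-- set(l) of a nonempty constant list is the singleton
theorem aux_foldl_add_const (c : Int) (l : List Int) (hall : ∀ x ∈ l, x = c) :
    l.foldl PySem.Set.add [c] = [c] := by
  induction l with
  | nil => rfl
  | cons x xs ih =>
    have hx : x = c := hall x (by simp)
    subst hx
    simp only [List.foldl_cons]
    have : PySem.Set.add [x] x = [x] := by simp [PySem.Set.add, PySem.Set.contains]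
    rw [this]
    exact ih (fun y hy => hall y (by simp [hy]))

theorem ofList_const (c : Int) (l : List Int) (hne : l ≠ []) (hall : ∀ x ∈ l, x = c) :
    PySem.Set.ofList l = [c] := by
  cases l with
  | nil => exact absurd rfl hne
  | cons x xs =>
    have hx : x = c := hall x (by simp)
    subst hx
    have : PySem.Set.ofList (x :: xs) = xs.foldl PySem.Set.add [x] := by
      simp [PySem.Set.ofList_eq_foldl, PySem.Set.add]
    rw [this]
    exact aux_foldl_add_const x xs (fun y hy => hall y (by simp [hy]))

theorem flatten_map_singleton {β γ : Type} (l : List γ) (g : γ → List β) :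
    (l.map (fun x => [g x])).flatten = l.map g := by
  induction l with
  | nil => rfl
  | cons x xs ih => simp [ih]

-- one zip step: zipping arg onto rows given as an indexed family appends arg[k] to the k-th row
theorem zip_step (f : Nat → List Int) (arg : List (List Int)) (n : Nat) (h : arg.length = n) :
    List.zipWith (· ++ ·) ((List.range n).map f) arg
      = (List.range n).map (fun k => f k ++ arg.getD k []) := by
  apply List.ext_getElem
  · simp [h]
  · intro i h1 h2
    have hi : i < n := by simpa [h] using h2
    simp [List.getD_eq_getElem?_getD, h ▸ hi]

-- invariant of B's fold over the arguments
theorem fold_inv (args : List (List (List Int))) (n : Nat) (f : Nat → List Int)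
    (h : ∀ a ∈ args, a.length = n) :
    args.foldl (fun out arg => List.zipWith (· ++ ·) out arg) ((List.range n).map f)
      = (List.range n).map (fun k => args.foldl (fun row arg => row ++ arg.getD k []) (f k)) := by
  induction args generalizing f with
  | nil => simp
  | cons a as ih =>
    simp only [List.foldl_cons]
    rw [zip_step f a n (h a (by simp)),
        ih (fun k => f k ++ a.getD k []) (fun x hx => h x (by simp [hx]))]

-- ===== VERDICT (by name: the statement is the Claim_ definition above) =====
theorem hstack_spec : Claim_equal_hstack := by
  intro args _hdom hpre
  obtain ⟨hne, hall⟩ := hpre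
  unfold Spec_hstack hstack hstack_alt
  set n : Nat := (args.headD []).length with hn
  have hsingle : PySem.Set.ofList (args.map (fun arg => (arg.length : Int))) = [(n : Int)] := by
    apply ofList_const
    · simpa using hne
    · intro x hx
      simp only [List.mem_map] at hx
      obtain ⟨a, ha, rfl⟩ := hx
      exact_mod_cast hall a ha
  simp only [hsingle]
  simp only [List.length_cons, List.length_nil, List.headD_cons, ne_eq, Int.toNat_natCast]
  norm_num
  have hrep : (List.replicate n ([] : List Int)) = (List.range n).map (fun _ => []) := by
    simp [List.map_const']
  rw [hrep, fold_inv args n (fun _ => []) (fun a ha => hall a ha)]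
  simp only [PySem.List.foldl_append_eq_flatMap, List.nil_append, List.flatMap_def]
  rw [PySem.List.pyRange_zero_natCast]
  rw [flatten_map_singleton]
  rw [List.map_map]
  refine List.map_congr_left ?_
  intro k hk
  simp [Function.comp, PySem.List.pyGetD_natCast]
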